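-- pv_equiv track=rewrite | github.com/juanestebancg2806/codeforces | 1303A/1303A.py | solve
-- ===== SOURCE A (Python) =====
-- def solve(s):
--     ans = i = j = anstmp =  0
--     while i < len(s):
--         j,anstmp = i+1,0
--         if s[i] == '1':
--             while j < len(s) and s[j] == '0':
--                 anstmp,j = anstmp+1,j+1
--             if j < len(s) and s[j] == '1':
--                 ans += anstmp
--         i += 1
--     return ans
-- ===== SOURCE B (Python) =====
-- def solve(s):
--     ans = 0
--     pending = None  # zeros seen since the last '1', None if run broken/no '1' yet
--     for c in s:
--         if c == '1':
--             if pending is not None: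
--                 ans += pending
--             pending = 0
--         elif c == '0':
--             if pending is not None:
--                 pending += 1
--         else:
--             pending = None
--     return ans
-- ===== Notes on version B (the rewrite author's own statement) =====
-- stated objective: alternative
-- what changed: Replaces A's nested run-scanning loops (for each one-bit, rescan the following zero run and its terminator) with a single left-to-right pass maintaining an optional count of zeros since the last one-bit, added to the answer when the next one-bit arrives.
import Mathlib
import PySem

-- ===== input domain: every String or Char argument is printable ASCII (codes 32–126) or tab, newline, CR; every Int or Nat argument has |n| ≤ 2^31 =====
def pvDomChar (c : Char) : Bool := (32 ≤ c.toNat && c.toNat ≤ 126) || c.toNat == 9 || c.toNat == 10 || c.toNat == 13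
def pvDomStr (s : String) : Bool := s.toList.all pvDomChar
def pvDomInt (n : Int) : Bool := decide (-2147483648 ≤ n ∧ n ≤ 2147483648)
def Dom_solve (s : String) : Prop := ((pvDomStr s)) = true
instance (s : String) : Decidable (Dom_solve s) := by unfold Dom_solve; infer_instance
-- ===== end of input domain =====

-- B is a single-pass state machine instead of A's nested run-scanning loops; same cost, exact equivalence.

-- ===== PORT A =====
-- inner while: scan '0's accumulating anstmp; contribute anstmp iff the run is terminated by '1'
def solveInner (l : List Char) (anstmp : Int) : Int :=
  match l with
  | [] => 0
  | c :: r => if c = '0' then solveInner r (anstmp + 1)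
              else if c = '1' then anstmp else 0

-- outer while over positions i: if s[i] = '1', add the inner scan of the rest
def solveOuter (l : List Char) (ans : Int) : Int :=
  match l with
  | [] => ans
  | c :: r => solveOuter r (if c = '1' then ans + solveInner r 0 else ans)

def solve (s : String) : Int := solveOuter s.toList 0

-- ===== PORT B =====
-- state: (ans, pending) where pending = some p means p zeros seen since the last '1'
def solveStep (st : Int × Option Int) (c : Char) : Int × Option Int :=
  if c = '1' then (st.2.elim st.1 (fun p => st.1 + p), some 0)
  else if c = '0' then (st.1, st.2.map (· + 1))
  else (st.1, none)

def solve_alt (s : String) : Int := (s.toList.foldl solveStep (0, none)).1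

-- ===== PRECONDITION & SPEC =====
def Spec_solve (s : String) (out : Int) : Prop := out = solve_alt s
instance (s : String) (out : Int) : Decidable (Spec_solve s out) := by unfold Spec_solve; infer_instance

-- ===== CLAIM (what is proved, stated in full; the proofs are below) =====
def Claim_equal_solve : Prop := ∀ (s : String), Dom_solve s → Spec_solve s (solve s)

-- ===== LEMMAS AND PROOFS =====

-- a pending run of p zeros is resolved by B exactly as A's inner scan values it
theorem foldl_step_some (l : List Char) (ans p : Int) :
    (l.foldl solveStep (ans, some p)).1 = (l.foldl solveStep (ans + solveInner l p, none)).1 := by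
  induction l generalizing ans p with
  | nil => simp [solveInner]
  | cons c r ih =>
    by_cases h1 : c = '1'
    · simp [List.foldl, solveStep, solveInner, h1]
    · by_cases h0 : c = '0'
      · simp [List.foldl, solveStep, solveInner, h0, ih]
      · simp [List.foldl, solveStep, solveInner, h0, h1]

theorem foldl_step_none (l : List Char) (ans : Int) :
    (l.foldl solveStep (ans, none)).1 = solveOuter l ans := by
  induction l generalizing ans with
  | nil => simp [solveOuter]
  | cons c r ih =>
    by_cases h1 : c = '1'
    · simp [List.foldl, solveStep, solveOuter, h1, foldl_step_some, ih]
    · by_cases h0 : c = '0'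
      · simp [List.foldl, solveStep, solveOuter, h0, ih]
      · simp [List.foldl, solveStep, solveOuter, h0, h1, ih]

-- ===== VERDICT (by name: the statement is the Claim_ definition above) =====
theorem solve_spec : Claim_equal_solve := by
  intro s _
  unfold Spec_solve solve solve_alt
  exact (foldl_step_none s.toList 0).symm
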